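-- pv_equiv track=rewrite | github.com/dnd2dnd/MyStudy_CodingTest | 프로그래머스/Level-2/타겟 넘버.py | bfs
-- ===== SOURCE A (Python) =====
-- from collections import deque
--
-- def bfs(numbers, target):
--     answer = 0
--     queue = deque()
--     n = len(numbers)
--     queue.append([numbers[0],0])
--     queue.append([-1*numbers[0],0])
--     while queue:
--         temp, idx = queue.popleft()
--         idx += 1
--         if idx < n:
--             queue.append([temp+numbers[idx], idx])
--             queue.append([temp-numbers[idx], idx])
--         else:
--             if temp == target:
--                 answer += 1
--     return answer
-- ===== SOURCE B (Python) =====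
-- def bfs(numbers, target):
--     counts = {0: 1}
--     for x in numbers:
--         nxt = {}
--         for s, c in counts.items():
--             nxt[s + x] = nxt.get(s + x, 0) + c
--             nxt[s - x] = nxt.get(s - x, 0) + c
--         counts = nxt
--     return counts.get(target, 0)
-- ===== Notes on version B (the rewrite author's own statement) =====
-- stated objective: faster
-- what changed: Replaced A's breadth-first enumeration of all 2^n sign sequences through a FIFO queue with a single forward pass maintaining a dictionary from partial sum to the number of sign assignments reaching it.
import Mathlib
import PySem

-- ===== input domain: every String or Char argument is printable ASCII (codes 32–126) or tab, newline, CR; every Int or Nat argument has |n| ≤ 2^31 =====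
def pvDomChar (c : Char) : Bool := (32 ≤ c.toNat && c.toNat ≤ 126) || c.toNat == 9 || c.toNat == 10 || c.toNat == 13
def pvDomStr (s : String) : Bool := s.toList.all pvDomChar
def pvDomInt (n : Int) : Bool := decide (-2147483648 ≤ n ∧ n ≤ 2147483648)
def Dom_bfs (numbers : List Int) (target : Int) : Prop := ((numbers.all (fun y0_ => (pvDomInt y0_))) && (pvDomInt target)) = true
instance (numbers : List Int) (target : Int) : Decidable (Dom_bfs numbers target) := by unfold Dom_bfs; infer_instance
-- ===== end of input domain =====

-- B replaces A's breadth-first enumeration of all 2^n sign sequences with a one-pass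
-- dictionary DP (partial sum → number of sign assignments reaching it).

-- ===== PORT A =====
-- The BFS loop of A: queue of (temp, idx) pairs, FIFO.  The loop is total because the
-- measure Σ 3^(n-idx) over the queue strictly drops at every pop; `fuel`, consumed one
-- unit per pop and started at 2*3^len ≥ that measure, only makes the recursion
-- structural — the [] result for fuel = 0 is never reached.
def bfsLoop (numbers : List Int) (target : Int) (n : Int)
    (fuel : Nat) (queue : List (Int × Int)) (answer : Int) : Int :=
  match fuel, queue with
  | _, [] => answer
  | 0, _ :: _ => answer
  | fuel + 1, (temp, idx) :: rest =>
    -- Python does idx += 1; the incremented index is written idx + 1 below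
    if idx + 1 < n then
      -- numbers[idx+1] is always in range here when n = len numbers
      bfsLoop numbers target n fuel
        (rest ++ [(temp + PySem.List.pyGetD numbers (idx + 1) 0, idx + 1),
                  (temp - PySem.List.pyGetD numbers (idx + 1) 0, idx + 1)]) answer
    else if temp = target then
      bfsLoop numbers target n fuel rest (answer + 1)
    else
      bfsLoop numbers target n fuel rest answer

def bfs (numbers : List Int) (target : Int) : Int :=
  match numbers with
  | [] => 0    -- unreachable under Pre_bfs: Python raises IndexError on numbers[0]
  | x :: _ =>
    bfsLoop numbers target (PySem.List.len numbers) (2 * 3 ^ numbers.length)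
      [(x, 0), (-1 * x, 0)] 0

-- ===== PORT B =====
-- one round of B's inner loop: for s, c in counts.items(): nxt[s±x] = nxt.get(s±x,0)+c
def stepD (x : Int) (counts : PySem.Dict Int Int) : PySem.Dict Int Int :=
  counts.items.foldl
    (fun nxt p =>
      let n1 := nxt.insert (p.1 + x) (nxt.getD (p.1 + x) 0 + p.2)
      n1.insert (p.1 - x) (n1.getD (p.1 - x) 0 + p.2))
    PySem.Dict.empty

def bfs_alt (numbers : List Int) (target : Int) : Int :=
  (numbers.foldl (fun counts x => stepD x counts)
      ((PySem.Dict.empty : PySem.Dict Int Int).insert 0 1)).getD target 0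

-- ===== PRECONDITION & SPEC =====
-- Pre_ excludes only the empty list, on which A raises IndexError (numbers[0]).
def Pre_bfs (numbers : List Int) (target : Int) : Prop := numbers ≠ []
instance (numbers : List Int) (target : Int) : Decidable (Pre_bfs numbers target) := by
  unfold Pre_bfs; infer_instance

def pvWitness_bfs : List Int × Int := ([1, 1, 1, 1, 1], 3)

def Spec_bfs (numbers : List Int) (target : Int) (out : Int) : Prop := out = bfs_alt numbers target
instance (numbers : List Int) (target : Int) (out : Int) : Decidable (Spec_bfs numbers target out) := by
  unfold Spec_bfs; infer_instance

-- ===== CLAIM (what is proved, stated in full; the proofs are below) =====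
def Claim_equal_bfs : Prop := ∀ (numbers : List Int) (target : Int), Dom_bfs numbers target → Pre_bfs numbers target → Spec_bfs numbers target (bfs numbers target)
-- ===== LEMMAS AND PROOFS =====

-- reference count: number of ± sign assignments of xs with  t = Σ ±xᵢ
def ways : List Int → Int → Int
  | [], t => if t = 0 then 1 else 0
  | x :: xs, t => ways xs (t - x) + ways xs (t + x)

-- ---- A-side: the BFS loop computes answer + Σ over the queue of leaf counts ----

-- the termination measure: Σ 3^(n-idx) over the queue
def qMeasure (n : Int) (queue : List (Int × Int)) : Nat :=
  (queue.map (fun p => 3 ^ ((n - p.2).toNat))).sum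

theorem qMeasure_pos (n : Int) (p : Int × Int) (queue : List (Int × Int)) :
    0 < qMeasure n (p :: queue) := by
  have : 0 < 3 ^ ((n - p.2).toNat) := pow_pos (by norm_num) _
  simp only [qMeasure, List.map_cons, List.sum_cons]
  omega

theorem bfsLoop_inv (numbers : List Int) (target : Int) :
    ∀ (fuel : Nat) (queue : List (Int × Int)) (answer : Int),
    (∀ p ∈ queue, 0 ≤ p.2 ∧ p.2 < (numbers.length : Int)) →
    qMeasure (numbers.length : Int) queue ≤ fuel →
    bfsLoop numbers target (numbers.length : Int) fuel queue answer =
      answer + (queue.map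
        (fun p => ways (numbers.drop (p.2 + 1).toNat) (target - p.1))).sum := by
  intro fuel
  induction fuel with
  | zero =>
    intro queue answer h hm
    match queue with
    | [] => simp [bfsLoop]
    | p :: rest =>
      have := qMeasure_pos (numbers.length : Int) p rest
      omega
  | succ fuel ih =>
    intro queue answer h hm
    match queue with
    | [] => simp [bfsLoop]
    | (temp, idx) :: rest =>
      obtain ⟨h0, hn⟩ := h (temp, idx) (by simp)
      simp only at h0 hn
      have hrest : ∀ p ∈ rest, 0 ≤ p.2 ∧ p.2 < (numbers.length : Int) :=
        fun p hp => h p (List.mem_cons_of_mem _ hp)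
      have hmr : qMeasure (numbers.length : Int) ((temp, idx) :: rest)
          = 3 ^ (((numbers.length : Int) - idx).toNat) + qMeasure (numbers.length : Int) rest := by
        simp [qMeasure]
      rw [bfsLoop]
      by_cases hlt : idx + 1 < (numbers.length : Int)
      · rw [if_pos hlt]
        rw [ih _ answer (by
          intro p hp
          rcases List.mem_append.1 hp with hp | hp
          · exact hrest p hp
          · simp only [List.mem_cons, List.not_mem_nil, or_false] at hp
            rcases hp with rfl | rfl <;> exact ⟨by omega, by exact hlt⟩) (by
          have hsplit : qMeasure (numbers.length : Int)
              (rest ++ [(temp + PySem.List.pyGetD numbers (idx + 1) 0, idx + 1),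
                        (temp - PySem.List.pyGetD numbers (idx + 1) 0, idx + 1)])
              = qMeasure (numbers.length : Int) rest
                + (3 ^ (((numbers.length : Int) - (idx + 1)).toNat)
                   + 3 ^ (((numbers.length : Int) - (idx + 1)).toNat)) := by
            simp [qMeasure]
          rw [hsplit]
          have h2 : ((numbers.length : Int) - (idx + 1)).toNat + 1
              = ((numbers.length : Int) - idx).toNat := by omega
          have hpow : 3 ^ (((numbers.length : Int) - (idx + 1)).toNat)
                + 3 ^ (((numbers.length : Int) - (idx + 1)).toNat)
              < 3 ^ (((numbers.length : Int) - idx).toNat) := by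
            rw [← h2, pow_succ]
            have hp : 0 < (3:ℕ) ^ (((numbers.length : Int) - (idx + 1)).toNat) :=
              pow_pos (by norm_num) _
            omega
          omega)]
        simp only [List.map_append, List.map_cons, List.map_nil, List.sum_append, List.sum_cons,
          List.sum_nil]
        have hlt' : (idx + 1).toNat < numbers.length := by omega
        have hget : PySem.List.pyGetD numbers (idx + 1) 0 = numbers[(idx + 1).toNat] :=
          PySem.List.pyGetD_eq_getElem _ _ (by omega) hlt
        have hdrop : numbers.drop (idx + 1).toNat
            = numbers[(idx + 1).toNat] :: numbers.drop ((idx + 1).toNat + 1) :=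
          List.drop_eq_getElem_cons hlt'
        have ht : (idx + 1 + 1).toNat = (idx + 1).toNat + 1 := by omega
        rw [hget, hdrop, ht]
        simp only [ways]
        have e1 : target - (temp + numbers[(idx + 1).toNat])
            = target - temp - numbers[(idx + 1).toNat] := by ring
        have e2 : target - (temp - numbers[(idx + 1).toNat])
            = target - temp + numbers[(idx + 1).toNat] := by ring
        rw [e1, e2]
        ring
      · rw [if_neg hlt]
        have hdrop : numbers.drop (idx + 1).toNat = [] :=
          List.drop_eq_nil_of_le (by omega)
        have hm' : qMeasure (numbers.length : Int) rest ≤ fuel := by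
          have hp : 0 < 3 ^ (((numbers.length : Int) - idx).toNat) := pow_pos (by norm_num) _
          omega
        by_cases he : temp = target
        · rw [if_pos he]
          rw [ih _ (answer + 1) hrest hm']
          subst he
          simp only [List.map_cons, List.sum_cons, hdrop, ways, sub_self, if_true]
          ring
        · rw [if_neg he]
          rw [ih _ answer hrest hm']
          have hz : target - temp ≠ 0 := fun hc => he (by omega)
          simp only [List.map_cons, List.sum_cons, hdrop, ways]
          rw [if_neg hz]
          ring

theorem bfs_eq_ways (numbers : List Int) (target : Int) (h : numbers ≠ []) :
    bfs numbers target = ways numbers target := by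
  match numbers with
  | [] => exact absurd rfl h
  | x :: rest =>
    show bfsLoop (x :: rest) target (PySem.List.len (x :: rest)) (2 * 3 ^ (x :: rest).length)
        [(x, 0), (-1 * x, 0)] 0 = ways (x :: rest) target
    rw [PySem.List.len_eq]
    rw [bfsLoop_inv (x :: rest) target (2 * 3 ^ (x :: rest).length) [(x, 0), (-1 * x, 0)] 0
      (by
        intro p hp
        simp only [List.mem_cons, List.not_mem_nil] at hp
        rcases hp with rfl | rfl | hp
        · constructor <;> simp
        · constructor <;> simp
        · exact absurd hp (by simp))
      (by simp [qMeasure]; omega)]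
    simp only [List.map_cons, List.map_nil, List.sum_cons, List.sum_nil, ways]
    norm_num

-- ---- B-side ----

-- the value a single double-insert of B's inner loop contributes at key t
def contrib (x t : Int) (p : Int × Int) : Int :=
  (if t = p.1 + x then p.2 else 0) + (if t = p.1 - x then p.2 else 0)

theorem insert_getD_add (d : PySem.Dict Int Int) (k c t : Int) :
    ((d.insert k (d.getD k 0 + c)).getD t 0) = d.getD t 0 + (if t = k then c else 0) := by
  rw [PySem.Dict.getD_insert]
  split_ifs with h
  · rw [h]
  · ring

theorem inner_fold_getD (x t : Int) (items : List (Int × Int)) (acc : PySem.Dict Int Int) :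
    ((items.foldl
      (fun nxt p =>
        let n1 := nxt.insert (p.1 + x) (nxt.getD (p.1 + x) 0 + p.2)
        n1.insert (p.1 - x) (n1.getD (p.1 - x) 0 + p.2)) acc).getD t 0)
      = acc.getD t 0 + (items.map (contrib x t)).sum := by
  induction items generalizing acc with
  | nil => simp
  | cons p rest ih =>
    simp only [List.foldl_cons, List.map_cons, List.sum_cons]
    rw [ih, insert_getD_add, insert_getD_add, contrib]
    ring

theorem sum_zero_of_not_mem (l : List (Int × Int)) (k : Int) (hk : k ∉ l.map Prod.fst) :
    (l.map (fun p => if p.1 = k then p.2 else 0)).sum = 0 := by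
  apply List.sum_eq_zero
  intro v hv
  simp only [List.mem_map] at hv
  obtain ⟨p, hp, rfl⟩ := hv
  have : p.1 ≠ k := fun he => hk (List.mem_map.2 ⟨p, hp, he⟩)
  simp [this]

theorem sum_if_eq (l : List (Int × Int)) (hl : (l.map Prod.fst).Nodup) (k : Int) :
    (l.map (fun p => if p.1 = k then p.2 else 0)).sum = (PySem.Dict.mk l).getD k 0 := by
  induction l with
  | nil => simp [PySem.Dict.getD_eq_get?_getD, PySem.Dict.get?]
  | cons p rest ih =>
    simp only [List.map_cons, List.sum_cons]
    rw [PySem.Dict.getD_eq_get?_getD, PySem.Dict.get?_mk_cons]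
    simp only [List.map_cons, List.nodup_cons] at hl
    by_cases he : p.1 = k
    · rw [if_pos he, sum_zero_of_not_mem rest k (he ▸ hl.1)]
      simp [he]
    · rw [if_neg (show ¬ (p.1 == k) = true by simpa using he)]
      rw [← PySem.Dict.getD_eq_get?_getD, ← ih hl.2]
      simp [he]

theorem contrib_sum (x t : Int) (l : List (Int × Int)) :
    (l.map (contrib x t)).sum
      = (l.map (fun p => if p.1 = t - x then p.2 else 0)).sum
        + (l.map (fun p => if p.1 = t + x then p.2 else 0)).sum := by
  induction l with
  | nil => simp
  | cons p rest ih =>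
    simp only [List.map_cons, List.sum_cons, ih, contrib]
    have h1 : (if t = p.1 + x then (p.2:Int) else 0) = (if p.1 = t - x then p.2 else 0) := by
      split_ifs <;> omega
    have h2 : (if t = p.1 - x then (p.2:Int) else 0) = (if p.1 = t + x then p.2 else 0) := by
      split_ifs <;> omega
    rw [h1, h2]; ring

theorem dict_mk_items (d : PySem.Dict Int Int) : PySem.Dict.mk d.items = d := by
  cases d; rfl

theorem stepD_getD (x : Int) (d : PySem.Dict Int Int) (hd : d.keys.Nodup) (t : Int) :
    (stepD x d).getD t 0 = d.getD (t - x) 0 + d.getD (t + x) 0 := by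
  have hnd : (d.items.map Prod.fst).Nodup := by
    simpa only [PySem.Dict.keys] using hd
  rw [stepD, inner_fold_getD, contrib_sum, sum_if_eq _ hnd, sum_if_eq _ hnd,
    dict_mk_items, PySem.Dict.getD_empty]
  ring

theorem stepD_nodup_aux (x : Int) (items : List (Int × Int)) (acc : PySem.Dict Int Int)
    (h : acc.keys.Nodup) :
    ((items.foldl
      (fun nxt p =>
        let n1 := nxt.insert (p.1 + x) (nxt.getD (p.1 + x) 0 + p.2)
        n1.insert (p.1 - x) (n1.getD (p.1 - x) 0 + p.2)) acc)).keys.Nodup := by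
  induction items generalizing acc with
  | nil => exact h
  | cons p rest ih =>
    exact ih _ (PySem.Dict.nodup_keys_insert _ _ _ (PySem.Dict.nodup_keys_insert _ _ _ h))

theorem stepD_nodup (x : Int) (d : PySem.Dict Int Int) : (stepD x d).keys.Nodup :=
  stepD_nodup_aux x d.items PySem.Dict.empty PySem.Dict.nodup_keys_empty

-- forward-DP semantics of B's outer loop, as a transformer of sum-count functions
def V : List Int → (Int → Int) → Int → Int
  | [], g, t => g t
  | x :: xs, g, t => V xs (fun u => g (u - x) + g (u + x)) t

theorem fold_stepD_getD (xs : List Int) (d : PySem.Dict Int Int) (g : Int → Int)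
    (hd : d.keys.Nodup) (hg : ∀ t, d.getD t 0 = g t) (t : Int) :
    (xs.foldl (fun counts x => stepD x counts) d).getD t 0 = V xs g t := by
  induction xs generalizing d g with
  | nil => simpa [V] using hg t
  | cons x rest ih =>
    simp only [List.foldl_cons, V]
    exact ih (stepD x d) _ (stepD_nodup x d)
      (fun u => by rw [stepD_getD x d hd u, hg, hg])

theorem V_add (xs : List Int) (g h : Int → Int) (t : Int) :
    V xs (fun u => g u + h u) t = V xs g t + V xs h t := by
  induction xs generalizing g h with
  | nil => simp [V]
  | cons x rest ih =>
    simp only [V]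
    have : (fun u => (g (u - x) + h (u - x)) + (g (u + x) + h (u + x)))
        = (fun u => ((g (u - x) + g (u + x)) + (h (u - x) + h (u + x)))) := by
      funext u; ring
    rw [this, ih]

theorem V_delta (xs : List Int) (c t : Int) :
    V xs (fun u => if u = c then 1 else 0) t = ways xs (t - c) := by
  induction xs generalizing c t with
  | nil =>
    simp only [V, ways]
    split_ifs with h1 h2 h2 <;> omega
  | cons x rest ih =>
    simp only [V, ways]
    have : (fun u => (if u - x = c then (1:Int) else 0) + (if u + x = c then 1 else 0))
        = (fun u => (if u = c + x then (1:Int) else 0) + (if u = c - x then 1 else 0)) := by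
      funext u
      congr 1 <;> split_ifs <;> omega
    rw [this, V_add, ih, ih]
    have e1 : t - (c + x) = t - c - x := by ring
    have e2 : t - (c - x) = t - c + x := by ring
    rw [e1, e2]

theorem bfs_alt_eq_ways (numbers : List Int) (target : Int) :
    bfs_alt numbers target = ways numbers target := by
  rw [bfs_alt, fold_stepD_getD numbers _ (fun u => if u = 0 then 1 else 0)
    (PySem.Dict.nodup_keys_insert _ _ _ PySem.Dict.nodup_keys_empty)
    (fun u => by rw [PySem.Dict.getD_insert]; simp [PySem.Dict.getD_empty]),
    V_delta]
  rw [sub_zero]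

-- ===== VERDICT (by name: the statement is the Claim_ definition above) =====
theorem bfs_spec : Claim_equal_bfs := by
  intro numbers target _ hpre
  unfold Spec_bfs
  rw [bfs_eq_ways numbers target hpre, bfs_alt_eq_ways]
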